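-- pv_equiv track=rewrite | github.com/bjrtx/aoc2022Python | 2015/day3.py | houses
-- ===== SOURCE A (Python) =====
-- def houses(s):
--     x, y = 0, 0
--     seen = {(0, 0)}
--     for char in s:
--         match char:
--             case '>':
--                 x += 1
--             case '<':
--                 x -= 1
--             case '^':
--                 y += 1
--             case 'v':
--                 y -= 1
--         seen.add((x, y))
--     return seen
-- ===== SOURCE B (Python) =====
-- def _prefix(vals):
--     # yields 0, then each running total of vals
--     total = 0
--     yield total
--     for v in vals:
--         total += v
--         yield total
--
--
-- def houses(s):
--     xs = _prefix((c == '>') - (c == '<') for c in s)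
--     ys = _prefix((c == '^') - (c == 'v') for c in s)
--     return set(zip(xs, ys))
-- ===== Notes on version B (the rewrite author's own statement) =====
-- stated objective: alternative
-- what changed: Instead of one stateful 2-D walk that mutates (x,y) and inserts into a set, B decomposes the problem per axis: the x-coordinates and y-coordinates are two independent scalar prefix-sum streams of boolean-comparison differences ((c=='>')-(c=='<') and (c=='^')-(c=='v')), zipped together and fed once to set().
import Mathlib
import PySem

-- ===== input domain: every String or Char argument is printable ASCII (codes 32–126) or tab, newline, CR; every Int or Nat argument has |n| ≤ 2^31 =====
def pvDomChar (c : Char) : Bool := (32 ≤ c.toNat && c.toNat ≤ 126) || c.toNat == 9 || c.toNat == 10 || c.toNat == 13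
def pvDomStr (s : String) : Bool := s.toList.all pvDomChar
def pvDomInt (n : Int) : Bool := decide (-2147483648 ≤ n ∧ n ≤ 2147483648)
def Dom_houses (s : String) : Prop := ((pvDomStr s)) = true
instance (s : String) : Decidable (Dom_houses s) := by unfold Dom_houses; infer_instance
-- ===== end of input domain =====

-- B splits the 2-D walk into two independent scalar prefix-sum streams (per axis) zipped into the set; objective: alternative decomposition.


-- ===== PORT A =====
def housesStep (st : Int × Int × PySem.Set (Int × Int)) (c : Char) :
    Int × Int × PySem.Set (Int × Int) :=
  let x := st.1
  let y := st.2.1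
  let seen := st.2.2
  let p : Int × Int :=
    if c = '>' then (x + 1, y)
    else if c = '<' then (x - 1, y)
    else if c = '^' then (x, y + 1)
    else if c = 'v' then (x, y - 1)
    else (x, y)
  (p.1, p.2, PySem.Set.add seen p)

def houses (s : String) : List (Int × Int) :=
  (s.toList.foldl housesStep (0, 0, PySem.Set.add PySem.Set.empty ((0 : Int), (0 : Int)))).2.2

-- ===== PORT B =====
-- (c == '>') - (c == '<') : Python bool arithmetic
def bstepx (c : Char) : Int := (if c == '>' then 1 else 0) - (if c == '<' then 1 else 0)
def bstepy (c : Char) : Int := (if c == '^' then 1 else 0) - (if c == 'v' then 1 else 0)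

-- _prefix: 0 followed by running totals = List.scanl (+) 0
def houses_alt (s : String) : List (Int × Int) :=
  PySem.Set.ofList
    (List.zip ((s.toList.map bstepx).scanl (· + ·) 0) ((s.toList.map bstepy).scanl (· + ·) 0))

-- ===== PRECONDITION & SPEC =====
def Spec_houses (s : String) (out : List (Int × Int)) : Prop := out = houses_alt s
instance (s : String) (out : List (Int × Int)) : Decidable (Spec_houses s out) := by unfold Spec_houses; infer_instance

-- ===== CLAIM (what is proved, stated in full; the proofs are below) =====
def Claim_equal_houses : Prop := ∀ (s : String), Dom_houses s → Spec_houses s (houses s)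

-- ===== LEMMAS AND PROOFS =====

-- A's match on one character is exactly B's per-axis deltas.
lemma housesStep_eq (x y : Int) (seen : PySem.Set (Int × Int)) (c : Char) :
    housesStep (x, y, seen) c =
      (x + bstepx c, y + bstepy c, PySem.Set.add seen (x + bstepx c, y + bstepy c)) := by
  by_cases h1 : c = '>'
  · subst h1; simp [housesStep, bstepx, bstepy]
  by_cases h2 : c = '<'
  · subst h2; simp [housesStep, bstepx, bstepy, sub_eq_add_neg, h1]
  by_cases h3 : c = '^'
  · subst h3; simp [housesStep, bstepx, bstepy, h1, h2]
  by_cases h4 : c = 'v'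
  · subst h4; simp [housesStep, bstepx, bstepy, sub_eq_add_neg, h1, h2, h3]
  · simp [housesStep, bstepx, bstepy, h1, h2, h3, h4]

-- loop invariant: A's seen set is the fold of Set.add over the tail of the zipped per-axis prefix sums
lemma houses_loop (cs : List Char) (x y : Int) (seen : PySem.Set (Int × Int)) :
    (cs.foldl housesStep (x, y, seen)).2.2 =
      (List.zip ((cs.map bstepx).scanl (· + ·) x) ((cs.map bstepy).scanl (· + ·) y)).tail.foldl
        PySem.Set.add seen := by
  induction cs generalizing x y seen with
  | nil => simp [List.scanl]
  | cons c cs ih =>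
      simp only [List.foldl_cons, List.map_cons, List.scanl, housesStep_eq]
      rw [ih]
      cases cs with
      | nil => simp [List.scanl]
      | cons d ds => simp [List.scanl]

-- ===== VERDICT (by name: the statement is the Claim_ definition above) =====
theorem houses_spec : Claim_equal_houses := by
  intro s _
  unfold Spec_houses houses houses_alt
  rw [houses_loop, PySem.Set.ofList_eq_foldl]
  cases h : s.toList with
  | nil => simp [List.scanl]
  | cons c cs => simp [List.scanl, PySem.Set.add, PySem.Set.empty]
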